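-- pv_equiv track=rewrite | github.com/jashparmar23/Deep-Research-AI | backend/app/simple_api.py | categorize_scraped_data
-- ===== SOURCE A (Python) =====
-- def categorize_scraped_data(urls, scraped_texts, rapidai_content=""):
--     categorized = {}
--     if rapidai_content.strip():
--         categorized["RapidAI"] = [rapidai_content]
--     for url, text in zip(urls, scraped_texts):
--         if not text.strip():
--             continue
--         if "google.com/search" in url:
--             source = "Google Search"
--         elif "news.google.com" in url:
--             source = "Google News"
--         elif "wikipedia.org" in url:
--             source = "Wikipedia"
--         elif "reddit.com" in url:
--             source = "Reddit"
--         elif "medium.com" in url: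
--             source = "Medium"
--         elif "bbc.com" in url or "cnn.com" in url:
--             source = "News Site"
--         else:
--             source = "Other"
--         categorized.setdefault(source, []).append(text)
--     return categorized
-- ===== SOURCE B (Python) =====
-- _RULES = (
--     ("google.com/search", "Google Search"),
--     ("news.google.com", "Google News"),
--     ("wikipedia.org", "Wikipedia"),
--     ("reddit.com", "Reddit"),
--     ("medium.com", "Medium"),
--     ("bbc.com", "News Site"),
--     ("cnn.com", "News Site"),
-- )
--
--
-- def _source(url):
--     return next((name for sub, name in _RULES if sub in url), "Other")
--
--
-- def categorize_scraped_data(urls, scraped_texts, rapidai_content=""):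
--     # stage 1: tag every kept text with its source
--     tagged = [(_source(u), t) for u, t in zip(urls, scraped_texts) if t.strip()]
--     categorized = {}
--     if rapidai_content.strip():
--         categorized["RapidAI"] = [rapidai_content]
--     # stage 2: one bucket per distinct source, in first-appearance order
--     for s in dict.fromkeys(s for s, _ in tagged):
--         categorized[s] = [t for s2, t in tagged if s2 == s]
--     return categorized
-- ===== Notes on version B (the rewrite author's own statement) =====
-- stated objective: alternative
-- what changed: Replaces A's single pass (elif chain picking a source, setdefault-append growing each bucket one text at a time) by two staged passes: first tag every kept text with its source via a first-match scan of a flattened rule table, then create each distinct source's bucket in one shot by filtering the tagged list, in first-appearance order.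
import Mathlib
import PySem

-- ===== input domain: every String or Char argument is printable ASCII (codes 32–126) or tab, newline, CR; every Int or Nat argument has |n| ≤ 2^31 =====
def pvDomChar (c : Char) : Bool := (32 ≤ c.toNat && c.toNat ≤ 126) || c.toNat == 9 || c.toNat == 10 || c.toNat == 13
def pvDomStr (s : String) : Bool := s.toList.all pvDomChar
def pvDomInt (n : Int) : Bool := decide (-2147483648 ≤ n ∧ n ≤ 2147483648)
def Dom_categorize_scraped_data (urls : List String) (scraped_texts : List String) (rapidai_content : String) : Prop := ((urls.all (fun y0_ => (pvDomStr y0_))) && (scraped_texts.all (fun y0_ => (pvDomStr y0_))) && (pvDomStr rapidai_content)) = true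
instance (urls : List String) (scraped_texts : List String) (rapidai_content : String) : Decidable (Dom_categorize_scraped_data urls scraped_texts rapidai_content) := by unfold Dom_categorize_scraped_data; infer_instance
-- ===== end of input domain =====

-- B replaces A's single pass (elif chain + setdefault-append into the dict) by two staged
-- passes: tag each kept text with its source, then build one bucket per distinct source by
-- filtering the tagged list (objective: alternative); same return value and dict order.

-- ===== PORT A =====
-- literal transliteration of A: the elif chain picks the source;
-- categorized.setdefault(source, []).append(text) = d[source] = d.get(source, []) + [text],
-- i.e. Dict.modify source [] (· ++ [text])
def categorize_scraped_data (urls : List String) (scraped_texts : List String) (rapidai_content : String) : List (String × List String) :=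
  let categorized : PySem.Dict String (List String) := PySem.Dict.empty
  let categorized := if PySem.Str.strip rapidai_content ≠ "" then categorized.insert "RapidAI" [rapidai_content] else categorized
  let categorized := (urls.zip scraped_texts).foldl (fun d ut =>
    if PySem.Str.strip ut.2 = "" then d
    else
      let source :=
        if PySem.Str.isIn "google.com/search" ut.1 then "Google Search"
        else if PySem.Str.isIn "news.google.com" ut.1 then "Google News"
        else if PySem.Str.isIn "wikipedia.org" ut.1 then "Wikipedia"
        else if PySem.Str.isIn "reddit.com" ut.1 then "Reddit"
        else if PySem.Str.isIn "medium.com" ut.1 then "Medium"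
        else if PySem.Str.isIn "bbc.com" ut.1 || PySem.Str.isIn "cnn.com" ut.1 then "News Site"
        else "Other"
      d.modify source [] (· ++ [ut.2])) categorized
  categorized.items

-- ===== PORT B =====
-- Source B's flattened rule table (one substring per row)
def pvRules : List (String × String) :=
  [("google.com/search", "Google Search"),
   ("news.google.com", "Google News"),
   ("wikipedia.org", "Wikipedia"),
   ("reddit.com", "Reddit"),
   ("medium.com", "Medium"),
   ("bbc.com", "News Site"),
   ("cnn.com", "News Site")]

-- Source B's _source: next((name for sub, name in _RULES if sub in url), "Other")
def pvSource (url : String) : String :=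
  ((pvRules.find? (fun r => PySem.Str.isIn r.1 url)).map Prod.snd).getD "Other"

def categorize_scraped_data_alt (urls : List String) (scraped_texts : List String) (rapidai_content : String) : List (String × List String) :=
  -- stage 1: tagged = [(_source(u), t) for u, t in zip(urls, scraped_texts) if t.strip()]
  let tagged := ((urls.zip scraped_texts).filter (fun ut => PySem.Str.strip ut.2 ≠ "")).map
      (fun ut => (pvSource ut.1, ut.2))
  let categorized : PySem.Dict String (List String) := PySem.Dict.empty
  let categorized := if PySem.Str.strip rapidai_content ≠ "" then categorized.insert "RapidAI" [rapidai_content] else categorized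
  -- stage 2: for s in dict.fromkeys(...): categorized[s] = [t for s2, t in tagged if s2 == s]
  let categorized := (PySem.List.dedup (tagged.map Prod.fst)).foldl (fun d s =>
      d.insert s ((tagged.filter (fun p => p.1 == s)).map Prod.snd)) categorized
  categorized.items

-- ===== PRECONDITION & SPEC =====
def Spec_categorize_scraped_data (urls : List String) (scraped_texts : List String) (rapidai_content : String) (out : List (String × List String)) : Prop := out = categorize_scraped_data_alt urls scraped_texts rapidai_content
instance (urls : List String) (scraped_texts : List String) (rapidai_content : String) (out : List (String × List String)) : Decidable (Spec_categorize_scraped_data urls scraped_texts rapidai_content out) := by unfold Spec_categorize_scraped_data; infer_instance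

-- ===== CLAIM (what is proved, stated in full; the proofs are below) =====
def Claim_equal_categorize_scraped_data : Prop := ∀ (urls : List String) (scraped_texts : List String) (rapidai_content : String), Dom_categorize_scraped_data urls scraped_texts rapidai_content → Spec_categorize_scraped_data urls scraped_texts rapidai_content (categorize_scraped_data urls scraped_texts rapidai_content)

-- ===== LEMMAS AND PROOFS =====

-- Source B's first-match rule scan computes exactly A's elif chain
theorem pvSource_eq (url : String) :
    pvSource url =
      (if PySem.Str.isIn "google.com/search" url then "Google Search"
        else if PySem.Str.isIn "news.google.com" url then "Google News"
        else if PySem.Str.isIn "wikipedia.org" url then "Wikipedia"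
        else if PySem.Str.isIn "reddit.com" url then "Reddit"
        else if PySem.Str.isIn "medium.com" url then "Medium"
        else if PySem.Str.isIn "bbc.com" url || PySem.Str.isIn "cnn.com" url then "News Site"
        else "Other") := by
  unfold pvSource pvRules
  simp only [List.find?_cons]
  split_ifs <;> simp_all
  rename_i hor
  obtain h | h := hor
  · simp [h]
  · cases hb : PySem.Chars.isIn ['b', 'b', 'c', '.', 'c', 'o', 'm'] url.toList
    · simp [h]
    · simp

theorem pvSource_ne_rapidai (url : String) : pvSource url ≠ "RapidAI" := by
  rw [pvSource_eq]; split_ifs <;> simp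

-- A's skipping single pass over the pairs is the modify-fold over B's tagged list
theorem foldA_eq (l : List (String × String)) (d : PySem.Dict String (List String)) :
    l.foldl (fun d ut =>
      if PySem.Str.strip ut.2 = "" then d
      else
        let source :=
          if PySem.Str.isIn "google.com/search" ut.1 then "Google Search"
          else if PySem.Str.isIn "news.google.com" ut.1 then "Google News"
          else if PySem.Str.isIn "wikipedia.org" ut.1 then "Wikipedia"
          else if PySem.Str.isIn "reddit.com" ut.1 then "Reddit"
          else if PySem.Str.isIn "medium.com" ut.1 then "Medium"
          else if PySem.Str.isIn "bbc.com" ut.1 || PySem.Str.isIn "cnn.com" ut.1 then "News Site"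
          else "Other"
        d.modify source [] (· ++ [ut.2])) d
    = ((l.filter (fun ut => PySem.Str.strip ut.2 ≠ "")).map (fun ut => (pvSource ut.1, ut.2))).foldl
        (fun d p => d.modify p.1 [] (· ++ [p.2])) d := by
  induction l generalizing d with
  | nil => rfl
  | cons x xs ih =>
    by_cases h : PySem.Str.strip x.2 = ""
    · rw [List.foldl_cons, if_pos h]
      conv_rhs => rw [List.filter_cons,
        if_neg (show ¬ decide (PySem.Str.strip x.2 ≠ "") = true by simp [h])]
      exact ih d
    · rw [List.foldl_cons, if_neg h]
      conv_rhs => rw [List.filter_cons,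
        if_pos (show decide (PySem.Str.strip x.2 ≠ "") = true by simp [h]),
        List.map_cons, List.foldl_cons]
      rw [ih]
      congr 1
      simp only [← pvSource_eq]

-- updating a set with elements none of which are already present appends their dedup
theorem set_update_of_disjoint {α : Type} [BEq α] [LawfulBEq α]
    (xs : List α) (s : List α) (h : ∀ x ∈ xs, x ∉ s) :
    PySem.Set.update s xs = s ++ PySem.Set.ofList xs := by
  induction xs using List.reverseRecOn with
  | nil => simp [PySem.Set.update, PySem.Set.ofList]
  | append_singleton xs x ih =>
    have hx : x ∉ s := h x (by simp)
    have h' : ∀ y ∈ xs, y ∉ s := fun y hy => h y (by simp [hy])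
    have hupd : PySem.Set.update s (xs ++ [x]) = PySem.Set.add (PySem.Set.update s xs) x := by
      simp [PySem.Set.update, List.foldl_append]
    rw [hupd, ih h', PySem.Set.ofList_append_singleton]
    by_cases hmem : x ∈ PySem.Set.ofList xs
    · rw [PySem.Set.add_of_mem (by simp [hmem]), PySem.Set.add_of_mem hmem]
    · rw [PySem.Set.add_of_not_mem (by simp [hx, hmem]), PySem.Set.add_of_not_mem hmem,
        List.append_assoc]

-- a dict with nodup keys is its key list paired with its lookups
theorem items_eq_map_keys {κ ν : Type} [BEq κ] [LawfulBEq κ]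
    (d : PySem.Dict κ ν) (dflt : ν) (h : d.keys.Nodup) :
    d.items = d.keys.map (fun k => (k, d.getD k dflt)) := by
  have hk : d.keys.map (fun k => (k, d.getD k dflt))
      = d.items.map (fun p => (p.1, d.getD p.1 dflt)) := by
    simp only [PySem.Dict.keys, List.map_map]; rfl
  rw [hk]
  conv_lhs => rw [show d.items = d.items.map (fun p => (p.1, p.2)) by simp]
  apply List.map_congr_left
  intro p hp
  have := PySem.Dict.getD_of_mem_items d (by simpa using hp) h dflt
  simp [this]

-- the incremental modify-fold and B's grouping fold build the same dict (fresh keys only)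
theorem modify_group {κ ν : Type} [BEq κ] [LawfulBEq κ] [DecidableEq κ]
    (l : List (κ × ν)) (d : PySem.Dict κ (List ν))
    (hnod : d.keys.Nodup) (hfresh : ∀ p ∈ l, p.1 ∉ d.keys) :
    (l.foldl (fun d p => d.modify p.1 [] (· ++ [p.2])) d).items
      = ((PySem.List.dedup (l.map Prod.fst)).foldl
          (fun d s => d.insert s ((l.filter (fun p => p.1 == s)).map Prod.snd)) d).items := by
  have hdisj : ∀ x ∈ l.map Prod.fst, x ∉ d.keys := by
    intro x hx
    obtain ⟨p, hp, rfl⟩ := List.mem_map.mp hx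
    exact hfresh p hp
  have hkeysD : (l.foldl (fun d p => d.modify p.1 [] (· ++ [p.2])) d).keys
      = d.keys ++ PySem.Set.ofList (l.map Prod.fst) := by
    rw [PySem.Dict.keys_foldl_modify_key (key := Prod.fst)]
    exact set_update_of_disjoint _ _ hdisj
  have hnodD : (l.foldl (fun d p => d.modify p.1 [] (· ++ [p.2])) d).keys.Nodup :=
    PySem.Dict.nodup_keys_foldl_modify_key _ _ _ _ _ hnod
  have hR : ((PySem.List.dedup (l.map Prod.fst)).foldl
        (fun d s => d.insert s ((l.filter (fun p => p.1 == s)).map Prod.snd)) d).items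
      = d.items ++ (PySem.List.dedup (l.map Prod.fst)).map
          (fun s => (s, (l.filter (fun p => p.1 == s)).map Prod.snd)) :=
    PySem.Dict.items_foldl_insert_fresh _ (fun s => s) _ d
      (fun s hs => by
        have hsm : s ∈ l.map Prod.fst := by
          rw [PySem.List.mem_dedup] at hs; exact hs
        simp [PySem.Dict.contains_eq_decide_mem_keys, hdisj s hsm])
      (by simp)
  rw [items_eq_map_keys _ ([] : List ν) hnodD, hkeysD, hR, List.map_append]
  congr 1
  · rw [items_eq_map_keys d ([] : List ν) hnod]
    apply List.map_congr_left
    intro k hk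
    have hfil : l.filter (fun p => p.1 == k) = [] :=
      List.filter_eq_nil_iff.mpr (fun p hp => by
        simp only [beq_iff_eq]
        intro hpk
        exact hfresh p hp (hpk ▸ hk))
    rw [PySem.Dict.getD_foldl_modify_append, hfil]
    simp
  · rw [show PySem.Set.ofList (l.map Prod.fst) = PySem.List.dedup (l.map Prod.fst) from
      (PySem.List.dedup_eq_ofList _).symm]
    apply List.map_congr_left
    intro s hs
    have hsm : s ∈ l.map Prod.fst := by rw [PySem.List.mem_dedup] at hs; exact hs
    rw [PySem.Dict.getD_foldl_modify_append,
      PySem.Dict.getD_of_not_contains d ([] : List ν) (by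
        simp [PySem.Dict.contains_eq_decide_mem_keys, hdisj s hsm])]
    simp only [List.nil_append]

-- ===== VERDICT (by name: the statement is the Claim_ definition above) =====
theorem categorize_scraped_data_spec : Claim_equal_categorize_scraped_data := by
  intro urls scraped_texts rapidai_content _
  unfold Spec_categorize_scraped_data categorize_scraped_data categorize_scraped_data_alt
  dsimp only
  rw [foldA_eq]
  apply modify_group
  · by_cases hrc : PySem.Str.strip rapidai_content = "" <;>
      simp [hrc, PySem.Dict.keys_insert_of_not_contains, PySem.Dict.keys_empty,
        PySem.Dict.contains_empty]
  · intro p hp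
    obtain ⟨ut, hut, rfl⟩ := List.mem_map.mp hp
    by_cases hrc : PySem.Str.strip rapidai_content = "" <;>
      simp [hrc, PySem.Dict.keys_insert_of_not_contains, PySem.Dict.keys_empty,
        PySem.Dict.contains_empty, pvSource_ne_rapidai]
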